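-- pv_equiv track=rewrite | github.com/maxberezov/competitive_programming | codeforces/round_690/C.py | take_max_possible_from_set
-- ===== SOURCE A (Python) =====
-- from typing import Set
--
-- def take_max_possible_from_set(options: Set, current_sum: int) -> int:
--     """
--     Complexity of this function is O(1). It does 9 iterations maximum
--     """
--
--     digits = list(options)
--
--     while len(digits) > 0:  # O(1)
--         max_digit = max(digits)
--         if max_digit > current_sum:
--             digits.remove(max_digit)
--         else:
--             return max_digit
--     return -1
-- ===== SOURCE B (Python) =====
-- def take_max_possible_from_set(options, current_sum):
--     candidates = [x for x in options if x <= current_sum]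
--     return max(candidates) if candidates else -1
-- ===== Notes on version B (the rewrite author's own statement) =====
-- stated objective: faster
-- what changed: Replaces A's repeated max-and-remove while loop by a single filter pass over the options followed by one max reduction (or -1 when no element qualifies).
import Mathlib
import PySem

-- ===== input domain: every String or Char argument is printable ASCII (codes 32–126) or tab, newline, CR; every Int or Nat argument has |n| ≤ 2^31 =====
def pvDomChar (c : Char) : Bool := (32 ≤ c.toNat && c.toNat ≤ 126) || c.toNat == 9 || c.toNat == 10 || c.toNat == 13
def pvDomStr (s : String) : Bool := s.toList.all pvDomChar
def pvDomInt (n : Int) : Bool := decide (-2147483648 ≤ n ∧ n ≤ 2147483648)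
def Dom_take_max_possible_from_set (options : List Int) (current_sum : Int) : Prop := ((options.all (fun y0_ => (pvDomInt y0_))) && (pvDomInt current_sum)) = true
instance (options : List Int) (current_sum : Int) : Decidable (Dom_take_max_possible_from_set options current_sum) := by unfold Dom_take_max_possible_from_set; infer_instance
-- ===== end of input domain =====

-- B replaces A's repeated max-and-remove while loop by one filter pass plus a single max reduction (simpler).


-- ===== PORT A =====
-- length of remove? result, used for the while loop's termination
theorem pvRemoveLen (xs : List Int) (v : Int) (r : List Int)
    (h : PySem.List.remove? xs v = some r) : r.length < xs.length := by
  induction xs generalizing r with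
  | nil => simp [PySem.List.remove?] at h
  | cons x t ih =>
    by_cases hx : x = v
    · subst hx; simp [PySem.List.remove?_cons_self] at h; simp [← h]
    · rw [PySem.List.remove?_cons_of_ne t hx] at h
      cases ht : PySem.List.remove? t v with
      | none => rw [ht] at h; simp at h
      | some r' =>
        rw [ht] at h; simp at h
        have := ih r' ht
        simp [← h]; omega

-- the while loop of A: max, remove if too large, else return; -1 when exhausted
def takeLoop (digits : List Int) (current_sum : Int) : Int :=
  match hm : PySem.List.max? digits (fun y => y) with
  | none => -1
  | some m =>
    if m > current_sum then
      match hr : PySem.List.remove? digits m with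
      | none => -1  -- unreachable: m ∈ digits
      | some rest => takeLoop rest current_sum
    else m
termination_by digits.length
decreasing_by exact pvRemoveLen digits m _ hr

def take_max_possible_from_set (options : List Int) (current_sum : Int) : Int :=
  takeLoop options current_sum

-- ===== PORT B =====
def take_max_possible_from_set_alt (options : List Int) (current_sum : Int) : Int :=
  let candidates := options.filter (fun x => decide (x ≤ current_sum))
  match PySem.List.max? candidates (fun y => y) with
  | some m => m
  | none => -1

-- ===== PRECONDITION & SPEC =====
def Spec_take_max_possible_from_set (options : List Int) (current_sum : Int) (out : Int) : Prop := out = take_max_possible_from_set_alt options current_sum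
instance (options : List Int) (current_sum : Int) (out : Int) : Decidable (Spec_take_max_possible_from_set options current_sum out) := by unfold Spec_take_max_possible_from_set; infer_instance

-- ===== CLAIM (what is proved, stated in full; the proofs are below) =====
def Claim_equal_take_max_possible_from_set : Prop := ∀ (options : List Int) (current_sum : Int), Dom_take_max_possible_from_set options current_sum → Spec_take_max_possible_from_set options current_sum (take_max_possible_from_set options current_sum)

-- ===== LEMMAS AND PROOFS =====


theorem pvAltEq (options : List Int) (cs : Int) :
    take_max_possible_from_set_alt options cs =
      match PySem.List.max? (options.filter (fun x => decide (x ≤ cs))) (fun y => y) with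
      | some m => m
      | none => -1 := rfl

-- erasing an element that fails the predicate leaves the filter unchanged
theorem pvFilterErase (xs : List Int) (m cs : Int) (hm : cs < m) :
    (xs.erase m).filter (fun x => decide (x ≤ cs)) = xs.filter (fun x => decide (x ≤ cs)) := by
  induction xs with
  | nil => simp
  | cons x t ih =>
    by_cases hx : x = m
    · subst hx
      simp [List.erase_cons_head, show ¬ (x ≤ cs) by omega]
    · rw [List.erase_cons_tail (by simpa using hx)]
      simp only [List.filter_cons, ih]

theorem pvLoopEq (digits : List Int) (cs : Int) :
    takeLoop digits cs = take_max_possible_from_set_alt digits cs := by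
  induction digits using (fun motive ih d => @Nat.strongRecOn (fun n => ∀ l : List Int, l.length = n → motive l)
      d.length (fun n ihn l hl => ih l (fun l' hl' => ihn l'.length (hl ▸ hl') l' rfl)) d rfl :
      ∀ motive : List Int → Prop, (∀ l, (∀ l', l'.length < l.length → motive l') → motive l) → ∀ d, motive d) with
  | _ digits ih =>
  rw [takeLoop]
  cases hm : PySem.List.max? digits (fun y => y) with
  | none =>
    have hnil : digits = [] := (PySem.List.max?_eq_none_iff _ _).mp hm
    subst hnil
    rw [pvAltEq]
    simp only [List.filter_nil,
      (PySem.List.max?_eq_none_iff ([] : List Int) (fun y => y)).mpr rfl]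
  | some m =>
    have hmem : m ∈ digits := PySem.List.max?_mem hm
    have hmax : ∀ y ∈ digits, y ≤ m := fun y hy => PySem.List.max?_isMax hm y hy
    by_cases hgt : m > cs
    · simp only [hgt, if_true]
      have hr : PySem.List.remove? digits m = some (digits.erase m) :=
        PySem.List.remove?_eq_some_erase digits m hmem
      have hlen : (digits.erase m).length < digits.length := pvRemoveLen digits m _ hr
      rw [hr]
      show takeLoop (digits.erase m) cs = _
      rw [ih _ hlen, pvAltEq, pvAltEq, pvFilterErase digits m cs hgt]
    · simp only [hgt, if_false]
      -- m ≤ cs: m is in the filtered list and bounds it, so it is its max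
      have hle : m ≤ cs := not_lt.mp hgt
      have hmemf : m ∈ digits.filter (fun x => decide (x ≤ cs)) := by
        simp [List.mem_filter, hmem, hle]
      rw [pvAltEq]
      cases hm' : PySem.List.max? (digits.filter (fun x => decide (x ≤ cs))) (fun y => y) with
      | none =>
        have := (PySem.List.max?_eq_none_iff _ _).mp hm'
        rw [this] at hmemf; simp at hmemf
      | some m' =>
        have h1 : m ≤ m' := PySem.List.max?_isMax hm' m hmemf
        have hm'mem : m' ∈ digits := (List.mem_filter.mp (PySem.List.max?_mem hm')).1
        have h2 : m' ≤ m := hmax m' hm'mem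
        have hfin : m = m' := le_antisymm h1 h2
        exact hfin.trans rfl

-- ===== VERDICT (by name: the statement is the Claim_ definition above) =====
theorem take_max_possible_from_set_spec : Claim_equal_take_max_possible_from_set := by
  intro options current_sum _
  unfold Spec_take_max_possible_from_set take_max_possible_from_set
  exact pvLoopEq options current_sum
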